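-- pv_equiv track=rewrite | github.com/Kangsan-Jeon/AlgorithmTrain | Baekjoon/[완]12100_2048 (Easy).py | check
-- ===== SOURCE A (Python) =====
-- def check(myMap, N):
--     values = []
--     for i in range(N):
--         for j in range(N):
--             if myMap[i][j] != 0:
--                 if myMap[i][j] not in values:
--                     values.append(myMap[i][j])
--                 else:
--                     return True
--     return False
-- ===== SOURCE B (Python) =====
-- def check(myMap, N):
--     values = [myMap[i][j] for i in range(N) for j in range(N) if myMap[i][j] != 0]
--     return len(values) != len(set(values))
-- ===== Notes on version B (the rewrite author's own statement) =====
-- stated objective: simpler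
-- what changed: Instead of scanning with an incrementally maintained membership list and an early return, B flattens all nonzero values of the N x N window into one list and decides globally via len(values) != len(set(values)).
-- outside the precondition, e.g. on check([[1, 1], [0]], 2): A returns True, B raises IndexError
import Mathlib
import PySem

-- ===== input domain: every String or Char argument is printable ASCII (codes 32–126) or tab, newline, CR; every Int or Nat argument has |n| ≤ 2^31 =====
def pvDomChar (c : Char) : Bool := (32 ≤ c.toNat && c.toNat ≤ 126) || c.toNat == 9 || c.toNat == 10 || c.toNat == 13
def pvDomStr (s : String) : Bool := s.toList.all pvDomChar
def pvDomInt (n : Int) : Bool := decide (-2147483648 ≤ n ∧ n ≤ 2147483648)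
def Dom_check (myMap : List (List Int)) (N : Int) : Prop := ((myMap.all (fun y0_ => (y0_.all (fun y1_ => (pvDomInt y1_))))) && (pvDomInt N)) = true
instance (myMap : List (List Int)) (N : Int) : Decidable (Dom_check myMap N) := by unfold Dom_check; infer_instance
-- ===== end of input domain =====

-- B is a global re-decomposition of A: gather all nonzero values of the N×N window, then
-- decide duplicate existence by comparing the length with the length of the set of values.

-- ===== PORT A =====
-- inner 'for j in range(N)' loop; `none` = the early 'return True', `some values` = loop finished
-- (on an out-of-range index — Python IndexError, excluded by Pre_check — it stops and returns the current values)
def checkInner (row : List Int) (js : List Int) (values : List Int) : Option (List Int) :=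
  match js with
  | [] => some values
  | j :: rest =>
    match PySem.List.pyGet? row j with
    | none => some values
    | some v =>
      if v ≠ 0 then
        if v ∉ values then checkInner row rest (values ++ [v])
        else none
      else checkInner row rest values

-- outer 'for i in range(N)' loop carrying the accumulated 'values' list
def checkOuter (myMap : List (List Int)) (N : Int) (is : List Int) (values : List Int) : Bool :=
  match is with
  | [] => false
  | i :: rest =>
    match PySem.List.pyGet? myMap i with
    | none => false
    | some row =>
      match checkInner row (PySem.List.pyRange 0 N 1) values with
      | none => true
      | some values' => checkOuter myMap N rest values'

def check (myMap : List (List Int)) (N : Int) : Bool :=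
  checkOuter myMap N (PySem.List.pyRange 0 N 1) []

-- ===== PORT B =====
-- one cell of the comprehension: myMap[i][j] if nonzero (none also on an index error, excluded by Pre_check)
def cellVal? (myMap : List (List Int)) (i j : Int) : Option Int :=
  match PySem.List.pyGet? myMap i with
  | none => none
  | some row =>
    match PySem.List.pyGet? row j with
    | none => none
    | some v => if v ≠ 0 then some v else none

def check_alt (myMap : List (List Int)) (N : Int) : Bool :=
  let values := (PySem.List.pyRange 0 N 1).flatMap (fun i =>
    (PySem.List.pyRange 0 N 1).filterMap (fun j => cellVal? myMap i j))
  decide (values.length ≠ (PySem.Set.ofList values).length)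

-- ===== PRECONDITION & SPEC =====
-- Pre_check excludes grids whose top-left N×N window is incomplete: there Python A raises
-- IndexError unless its early 'return True' fires first (see claim cites), and Python B raises.
def Pre_check (myMap : List (List Int)) (N : Int) : Prop :=
  N ≤ (myMap.length : Int) ∧ ∀ row ∈ myMap.take N.toNat, N ≤ (row.length : Int)
instance (myMap : List (List Int)) (N : Int) : Decidable (Pre_check myMap N) := by unfold Pre_check; infer_instance

def pvWitness_check : List (List Int) × Int := ([[1, 2], [3, 0]], 2)

def Spec_check (myMap : List (List Int)) (N : Int) (out : Bool) : Prop := out = check_alt myMap N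
instance (myMap : List (List Int)) (N : Int) (out : Bool) : Decidable (Spec_check myMap N out) := by unfold Spec_check; infer_instance

-- ===== CLAIM (what is proved, stated in full; the proofs are below) =====
def Claim_equal_check : Prop := ∀ (myMap : List (List Int)) (N : Int), Dom_check myMap N → Pre_check myMap N → Spec_check myMap N (check myMap N)

-- ===== LEMMAS AND PROOFS =====

-- abstract inner scan on the already-extracted list of nonzero values
def pvScan (L values : List Int) : Option (List Int) :=
  match L with
  | [] => some values
  | v :: rest => if v ∉ values then pvScan rest (values ++ [v]) else none

lemma checkInner_eq_scan (row : List Int) :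
    ∀ (js values : List Int), (∀ j ∈ js, ∃ v, PySem.List.pyGet? row j = some v) →
    checkInner row js values =
      pvScan (js.filterMap (fun j => (PySem.List.pyGet? row j).bind
        (fun v => if v ≠ 0 then some v else none))) values := by
  intro js
  induction js with
  | nil => intro values _; rfl
  | cons j rest ih =>
    intro values h
    obtain ⟨v, hv⟩ := h j (by simp)
    have hrest : ∀ j ∈ rest, ∃ v, PySem.List.pyGet? row j = some v :=
      fun j hj => h j (by simp [hj])
    by_cases h0 : v = 0
    · simp [checkInner, hv, h0, ih _ hrest]
    · by_cases hm : v ∈ values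
      · simp [checkInner, hv, h0, hm, pvScan]
      · simp [checkInner, hv, h0, hm, pvScan, ih _ hrest]

lemma pvScan_eq : ∀ (L values : List Int), values.Nodup →
    pvScan L values = if (values ++ L).Nodup then some (values ++ L) else none := by
  intro L
  induction L with
  | nil => intro values h; simp [pvScan, h]
  | cons v rest ih =>
    intro values h
    by_cases hm : v ∈ values
    · have : ¬ (values ++ v :: rest).Nodup := by
        intro hnd
        exact (List.disjoint_of_nodup_append hnd) hm (by simp)
      simp [pvScan, hm, this]
    · have hnd : (values ++ [v]).Nodup := by
        rw [List.nodup_append]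
        refine ⟨h, by simp, ?_⟩
        intro a ha b hb
        rw [List.mem_singleton] at hb
        subst hb
        exact fun he => hm (he ▸ ha)
      have he : values ++ v :: rest = (values ++ [v]) ++ rest := by simp
      rw [he]
      show (if v ∉ values then pvScan rest (values ++ [v]) else none) = _
      rw [if_pos hm, ih _ hnd]

-- Pre_check gives: every cell of the window exists, so cellVal? is the nonzero cell of the actual row
lemma pre_rows (myMap : List (List Int)) (N : Int) (hpre : Pre_check myMap N) :
    ∀ i ∈ PySem.List.pyRange 0 N 1, ∃ row, PySem.List.pyGet? myMap i = some row ∧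
      (∀ j ∈ PySem.List.pyRange 0 N 1, ∃ v, PySem.List.pyGet? row j = some v) ∧
      (∀ j, (PySem.List.pyGet? row j).bind (fun v => if v ≠ 0 then some v else none)
            = cellVal? myMap i j) := by
  intro i hi
  rw [PySem.List.mem_pyRange_one] at hi
  obtain ⟨hi0, hiN⟩ := hi
  have hilen : i < (myMap.length : Int) := lt_of_lt_of_le hiN hpre.1
  have hrow : PySem.List.pyGet? myMap i = some myMap[i.toNat] :=
    PySem.List.pyGet?_eq_some_getElem myMap hi0 hilen
  refine ⟨myMap[i.toNat], hrow, ?_, ?_⟩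
  · intro j hj
    rw [PySem.List.mem_pyRange_one] at hj
    obtain ⟨hj0, hjN⟩ := hj
    have hmem : myMap[i.toNat] ∈ myMap.take N.toNat := by
      have : i.toNat < N.toNat := by omega
      have hlt : i.toNat < (myMap.take N.toNat).length := by
        simp [List.length_take]; omega
      have : (myMap.take N.toNat)[i.toNat] = myMap[i.toNat] := List.getElem_take
      exact this ▸ (List.getElem_mem hlt)
    have hrlen := hpre.2 _ hmem
    exact ⟨myMap[i.toNat][j.toNat],
      PySem.List.pyGet?_eq_some_getElem myMap[i.toNat] hj0 (lt_of_lt_of_le hjN hrlen)⟩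
  · intro j
    cases hj : PySem.List.pyGet? myMap[i.toNat] j <;> simp [cellVal?, hrow, hj]

-- the flattened window B builds
def pvFlat (myMap : List (List Int)) (N : Int) (is : List Int) : List Int :=
  is.flatMap (fun i => (PySem.List.pyRange 0 N 1).filterMap (fun j => cellVal? myMap i j))

lemma checkOuter_eq (myMap : List (List Int)) (N : Int) :
    ∀ (is values : List Int), values.Nodup →
    (∀ i ∈ is, ∃ row, PySem.List.pyGet? myMap i = some row ∧
      (∀ j ∈ PySem.List.pyRange 0 N 1, ∃ v, PySem.List.pyGet? row j = some v) ∧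
      (∀ j, (PySem.List.pyGet? row j).bind (fun v => if v ≠ 0 then some v else none)
            = cellVal? myMap i j)) →
    checkOuter myMap N is values = decide ¬ (values ++ pvFlat myMap N is).Nodup := by
  intro is
  induction is with
  | nil =>
    intro values hnd _
    simp [checkOuter, pvFlat, hnd]
  | cons i rest ih =>
    intro values hnd h
    obtain ⟨row, hrow, hcells, hcv⟩ := h i (by simp)
    have hrest := fun i hi => h i (List.mem_cons_of_mem _ hi)
    have hinner := checkInner_eq_scan row (PySem.List.pyRange 0 N 1) values hcells
    have hcong : (PySem.List.pyRange 0 N 1).filterMap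
        (fun j => (PySem.List.pyGet? row j).bind (fun v => if v ≠ 0 then some v else none))
        = (PySem.List.pyRange 0 N 1).filterMap (fun j => cellVal? myMap i j) := by
      exact List.filterMap_congr (fun j _ => hcv j)
    rw [hcong] at hinner
    set C := (PySem.List.pyRange 0 N 1).filterMap (fun j => cellVal? myMap i j) with hC
    have hflat : pvFlat myMap N (i :: rest) = C ++ pvFlat myMap N rest := by
      simp [pvFlat, hC]
    rw [pvScan_eq C values hnd] at hinner
    by_cases hnd2 : (values ++ C).Nodup
    · rw [if_pos hnd2] at hinner
      simp only [checkOuter, hrow, hinner]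
      rw [ih (values ++ C) hnd2 hrest, hflat]
      congr 1
      simp [List.append_assoc]
    · rw [if_neg hnd2] at hinner
      simp only [checkOuter, hrow, hinner]
      have : ¬ (values ++ pvFlat myMap N (i :: rest)).Nodup := by
        intro hbig
        apply hnd2
        rw [hflat, ← List.append_assoc] at hbig
        exact hbig.of_append_left
      simp [this]

-- len(set(L)) = len(L) iff L has no duplicates
lemma ofList_length_eq_iff : ∀ (L : List Int),
    (PySem.Set.ofList L).length = L.length ↔ L.Nodup := by
  intro L
  induction L using List.reverseRecOn with
  | nil => simp [PySem.Set.ofList]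
  | append_singleton xs x ih =>
    rw [PySem.Set.ofList_append_singleton]
    by_cases hm : x ∈ xs
    · have hm' : x ∈ PySem.Set.ofList xs := by rw [PySem.Set.mem_ofList]; exact hm
      rw [PySem.Set.add_of_mem hm']
      have hle := PySem.Set.length_ofList_le (xs := xs)
      constructor
      · intro h; simp at h; omega
      · intro h
        exact ((List.disjoint_of_nodup_append h) hm (by simp)).elim
    · have hm' : x ∉ PySem.Set.ofList xs := by rw [PySem.Set.mem_ofList]; exact hm
      rw [PySem.Set.add_of_not_mem hm']
      simp only [List.length_append, List.length_singleton]
      rw [List.nodup_append]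
      constructor
      · intro h
        have hlen : (PySem.Set.ofList xs).length = xs.length := by omega
        refine ⟨ih.mp hlen, by simp, ?_⟩
        intro a ha b hb
        rw [List.mem_singleton] at hb
        subst hb
        exact fun he => hm (he ▸ ha)
      · intro ⟨h1, _, _⟩
        have := ih.mpr h1
        omega

-- ===== VERDICT (by name: the statement is the Claim_ definition above) =====
theorem check_spec : Claim_equal_check := by
  intro myMap N _ hpre
  unfold Spec_check check check_alt
  rw [checkOuter_eq myMap N (PySem.List.pyRange 0 N 1) [] (by simp) (pre_rows myMap N hpre)]
  have hflat : pvFlat myMap N (PySem.List.pyRange 0 N 1) =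
      (PySem.List.pyRange 0 N 1).flatMap (fun i =>
        (PySem.List.pyRange 0 N 1).filterMap (fun j => cellVal? myMap i j)) := rfl
  simp only [List.nil_append, hflat]
  set L := (PySem.List.pyRange 0 N 1).flatMap (fun i =>
    (PySem.List.pyRange 0 N 1).filterMap (fun j => cellVal? myMap i j))
  have := ofList_length_eq_iff L
  by_cases h : L.Nodup
  · simp [h, this.mpr h]
  · have : (PySem.Set.ofList L).length ≠ L.length := fun he => h (this.mp he)
    simp [h, Ne.symm this]
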